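-- pv_equiv track=rewrite | github.com/Dyhlio/wastream | wastream/services/stream.py | _season_episode_to_absolute
-- ===== SOURCE A (Python) =====
-- from typing import List, Dict, Optional
--
-- def _season_episode_to_absolute(season: int, episode: int, seasons_data: List[Dict]) -> Optional[int]:
--     if not seasons_data:
--         return None
--
--     absolute = 0
--     for s in seasons_data:
--         s_num = s.get("number", 0)
--         ep_count = s.get("episode_count", 0)
--
--         if s_num < season:
--             absolute += ep_count
--         elif s_num == season:
--             return absolute + episode
--
--     return None
-- ===== SOURCE B (Python) =====
-- from typing import List, Dict, Optional
--
-- def _season_episode_to_absolute(season: int, episode: int, seasons_data: List[Dict]) -> Optional[int]: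
--     # Pass 1: precompute a prefix-sum table of lower-season episode counts.
--     prefix = [0]
--     for s in seasons_data:
--         contrib = s.get("episode_count", 0) if s.get("number", 0) < season else 0
--         prefix.append(prefix[-1] + contrib)
--     # Pass 2: table lookup at the first season whose number matches.
--     for s, offset in zip(seasons_data, prefix):
--         if s.get("number", 0) == season:
--             return episode + offset
--     return None
-- ===== Notes on version B (the rewrite author's own statement) =====
-- stated objective: alternative
-- what changed: Replaces A's fused accumulating early-return scan by a two-stage table method: first build an explicit prefix-sum table of lower-season episode counts, then look up the offset at the first matching season via zip.
import Mathlib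
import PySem

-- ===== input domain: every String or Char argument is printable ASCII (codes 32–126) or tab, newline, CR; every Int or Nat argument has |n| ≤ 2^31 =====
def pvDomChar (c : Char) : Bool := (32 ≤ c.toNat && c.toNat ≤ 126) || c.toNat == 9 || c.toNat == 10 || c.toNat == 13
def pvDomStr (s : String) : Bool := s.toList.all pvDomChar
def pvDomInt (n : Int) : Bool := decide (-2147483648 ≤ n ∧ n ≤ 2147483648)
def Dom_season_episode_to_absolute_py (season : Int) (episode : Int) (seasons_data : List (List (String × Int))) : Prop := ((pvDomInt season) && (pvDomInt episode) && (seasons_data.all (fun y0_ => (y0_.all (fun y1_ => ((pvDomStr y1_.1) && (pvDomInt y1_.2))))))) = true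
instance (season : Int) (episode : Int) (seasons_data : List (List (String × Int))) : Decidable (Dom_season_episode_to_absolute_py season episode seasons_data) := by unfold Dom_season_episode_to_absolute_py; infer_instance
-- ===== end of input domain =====

-- B replaces A's fused accumulating early-return scan by two staged passes: build an
-- explicit prefix-sum table of lower-season episode counts, then a zip lookup at the
-- first matching season; alternative decomposition, same cost.

-- dict.get(k, d) on a dict given as an association list (first match), shared dict primitive
def pvDictGetD (s : List (String × Int)) (k : String) (d : Int) : Int :=
  match s.find? (fun p => p.1 == k) with
  | some p => p.2
  | none => d

-- ===== PORT A =====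
def seaLoopA (season episode acc : Int) : List (List (String × Int)) → Option Int
  | [] => none
  | s :: rest =>
    let s_num := pvDictGetD s "number" 0
    let ep_count := pvDictGetD s "episode_count" 0
    if s_num < season then seaLoopA season episode (acc + ep_count) rest
    else if s_num == season then some (acc + episode)
    else seaLoopA season episode acc rest

def season_episode_to_absolute_py (season : Int) (episode : Int) (seasons_data : List (List (String × Int))) : Option Int :=
  if seasons_data = [] then none
  else seaLoopA season episode 0 seasons_data

-- ===== PORT B =====
-- pass 1 loop body: running prefix list, carried as (emitted tail, running last = prefix[-1])
def seaPrefixGo (season : Int) : List (List (String × Int)) → Int → List Int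
  | [], _ => []
  | s :: rest, last =>
    let contrib := if pvDictGetD s "number" 0 < season then pvDictGetD s "episode_count" 0 else 0
    (last + contrib) :: seaPrefixGo season rest (last + contrib)

def seaPrefix (season : Int) (seasons_data : List (List (String × Int))) : List Int :=
  0 :: seaPrefixGo season seasons_data 0

-- pass 2: zip with the table and look up the first matching season
def season_episode_to_absolute_py_alt (season : Int) (episode : Int) (seasons_data : List (List (String × Int))) : Option Int :=
  match (seasons_data.zip (seaPrefix season seasons_data)).find?
      (fun q => pvDictGetD q.1 "number" 0 == season) with
  | some q => some (episode + q.2)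
  | none => none

-- ===== PRECONDITION & SPEC =====
def Spec_season_episode_to_absolute_py (season : Int) (episode : Int) (seasons_data : List (List (String × Int))) (out : Option Int) : Prop := out = season_episode_to_absolute_py_alt season episode seasons_data
instance (season : Int) (episode : Int) (seasons_data : List (List (String × Int))) (out : Option Int) : Decidable (Spec_season_episode_to_absolute_py season episode seasons_data out) := by unfold Spec_season_episode_to_absolute_py; infer_instance

-- ===== CLAIM (what is proved, stated in full; the proofs are below) =====
def Claim_equal_season_episode_to_absolute_py : Prop := ∀ (season : Int) (episode : Int) (seasons_data : List (List (String × Int))), Dom_season_episode_to_absolute_py season episode seasons_data → Spec_season_episode_to_absolute_py season episode seasons_data (season_episode_to_absolute_py season episode seasons_data)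

-- ===== LEMMAS AND PROOFS =====

theorem seaPrefixGo_shift (season a : Int) :
    ∀ (xs : List (List (String × Int))) (b : Int),
      seaPrefixGo season xs (a + b) = (seaPrefixGo season xs b).map (fun v => a + v) := by
  intro xs
  induction xs with
  | nil => intro b; simp [seaPrefixGo]
  | cons s rest ih =>
    intro b
    simp only [seaPrefixGo, List.map, List.cons.injEq]
    refine ⟨by ring, ?_⟩
    rw [show a + b + (if pvDictGetD s "number" 0 < season then pvDictGetD s "episode_count" 0 else 0)
            = a + (b + (if pvDictGetD s "number" 0 < season then pvDictGetD s "episode_count" 0 else 0)) by ring]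
    exact ih _

theorem seaPrefix_cons (season : Int) (s : List (String × Int)) (rest : List (List (String × Int))) :
    seaPrefix season (s :: rest) =
      0 :: (seaPrefix season rest).map
        (fun v => (if pvDictGetD s "number" 0 < season then pvDictGetD s "episode_count" 0 else 0) + v) := by
  simp only [seaPrefix, seaPrefixGo, List.map]
  congr 1
  congr 1
  · ring
  · rw [show (0 : Int) + (if pvDictGetD s "number" 0 < season then pvDictGetD s "episode_count" 0 else 0)
            = (if pvDictGetD s "number" 0 < season then pvDictGetD s "episode_count" 0 else 0) + 0 by ring]
    exact seaPrefixGo_shift season _ rest 0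

theorem find_zip_shift (p : List (String × Int) → Bool) (f : Int → Int) :
    ∀ (xs : List (List (String × Int))) (pre : List Int),
      ((xs.zip (pre.map f)).find? (fun q => p q.1)) =
        ((xs.zip pre).find? (fun q => p q.1)).map (Prod.map id f) := by
  intro xs
  induction xs with
  | nil => intro pre; simp
  | cons s rest ih =>
    intro pre
    cases pre with
    | nil => simp
    | cons a pre' =>
      by_cases hp : p s
      · simp [hp]
      · simp only [List.map, List.zip_cons_cons, List.find?, hp]
        exact ih pre'

theorem seaLoopA_eq_alt (season episode : Int) :
    ∀ (xs : List (List (String × Int))) (acc : Int),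
      seaLoopA season episode acc xs =
        (season_episode_to_absolute_py_alt season episode xs).map (fun v => acc + v) := by
  intro xs
  induction xs with
  | nil =>
    intro acc
    simp [seaLoopA, season_episode_to_absolute_py_alt, seaPrefix, seaPrefixGo]
  | cons s rest ih =>
    intro acc
    have hz : (s :: rest).zip (seaPrefix season (s :: rest)) =
        (s, (0 : Int)) :: rest.zip ((seaPrefix season rest).map
          (fun v => (if pvDictGetD s "number" 0 < season then pvDictGetD s "episode_count" 0 else 0) + v)) := by
      rw [seaPrefix_cons]; rfl
    by_cases heq : pvDictGetD s "number" 0 = season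
    · have hlt : ¬ pvDictGetD s "number" 0 < season := by omega
      simp [seaLoopA, season_episode_to_absolute_py_alt, hz, heq, Int.add_comm]
    · have hne : (pvDictGetD s "number" 0 == season) = false := by simp [heq]
      have hfs : ((s :: rest).zip (seaPrefix season (s :: rest))).find?
            (fun q => pvDictGetD q.1 "number" 0 == season) =
          ((rest.zip (seaPrefix season rest)).find?
            (fun q => pvDictGetD q.1 "number" 0 == season)).map
            (Prod.map id (fun v => (if pvDictGetD s "number" 0 < season then pvDictGetD s "episode_count" 0 else 0) + v)) := by
        rw [hz]
        simp only [List.find?, hne]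
        exact find_zip_shift (fun l => pvDictGetD l "number" 0 == season) _ rest (seaPrefix season rest)
      by_cases hlt : pvDictGetD s "number" 0 < season
      · simp only [seaLoopA, if_pos hlt, hne, ih]
        unfold season_episode_to_absolute_py_alt
        rw [hfs]
        cases hf : (rest.zip (seaPrefix season rest)).find?
            (fun q => pvDictGetD q.1 "number" 0 == season) with
        | none => simp
        | some q =>
          simp [hlt, Prod.map]
          ring
      · simp only [seaLoopA, if_neg hlt, hne, ih]
        unfold season_episode_to_absolute_py_alt
        rw [hfs]
        cases hf : (rest.zip (seaPrefix season rest)).find?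
            (fun q => pvDictGetD q.1 "number" 0 == season) with
        | none => simp
        | some q =>
          simp [hlt, Prod.map]

-- ===== VERDICT (by name: the statement is the Claim_ definition above) =====
theorem season_episode_to_absolute_py_spec : Claim_equal_season_episode_to_absolute_py := by
  intro season episode seasons_data _
  unfold Spec_season_episode_to_absolute_py season_episode_to_absolute_py
  split
  · next h => simp [h, season_episode_to_absolute_py_alt, seaPrefix, seaPrefixGo]
  · rw [seaLoopA_eq_alt]
    cases season_episode_to_absolute_py_alt season episode seasons_data <;> simp
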